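-- pv_equiv track=rewrite | github.com/UPside-Lumos-V2/hack-detector | src/scorer.py | _parse_platform_author_stats
-- ===== SOURCE A (Python) =====
-- def _parse_platform_author_stats(
--     source_authors: list[str],
-- ) -> dict[str, tuple[int, int]]:
--     # Entry format from grouper: "{platform}:{author}:{tier}"
--     # rfind(":") isolates the trailing tier so colons inside author names are safe.
--     platform_keys: dict[str, set[str]] = {}
--     platform_t1: dict[str, int] = {}
--
--     for entry in source_authors:
--         colon_pos = entry.rfind(":")
--         if colon_pos == -1:
--             continue
--         key = entry[:colon_pos]
--         tier_str = entry[colon_pos + 1:]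
--
--         first_colon = key.find(":")
--         if first_colon == -1:
--             continue
--         platform = key[:first_colon]
--
--         if platform not in platform_keys:
--             platform_keys[platform] = set()
--             platform_t1[platform] = 0
--
--         is_new_key = key not in platform_keys[platform]
--         platform_keys[platform].add(key)
--         if is_new_key and tier_str.isdigit() and int(tier_str) == 1:
--             platform_t1[platform] += 1
--
--     return {
--         platform: (len(keys), platform_t1[platform])
--         for platform, keys in platform_keys.items()
--     }
-- ===== SOURCE B (Python) =====
-- def _parse_platform_author_stats(
--     source_authors: list[str],
-- ) -> dict[str, tuple[int, int]]:
--     # Pass 1: first-occurrence-wins map from full key "{platform}:{author}" to its tier string.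
--     first_tier: dict[str, str] = {}
--     for entry in source_authors:
--         colon_pos = entry.rfind(":")
--         if colon_pos == -1:
--             continue
--         key = entry[:colon_pos]
--         if key.find(":") == -1:
--             continue
--         if key not in first_tier:
--             first_tier[key] = entry[colon_pos + 1:]
--     # Pass 2: aggregate per platform (insertion order of keys gives platform order).
--     stats: dict[str, tuple[int, int]] = {}
--     for key, tier in first_tier.items():
--         platform = key[:key.find(":")]
--         cnt, t1 = stats.get(platform, (0, 0))
--         stats[platform] = (cnt + 1, t1 + (1 if tier.isdigit() and int(tier) == 1 else 0))
--     return stats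
-- ===== Notes on version B (the rewrite author's own statement) =====
-- stated objective: alternative
-- what changed: Replaces the interleaved per-platform dict-of-sets + counter updates by two passes: a single first-occurrence-wins dict from the full key to its tier string, then an aggregation pass over that dict that counts keys and tier-1 first tiers per platform.
import Mathlib
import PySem

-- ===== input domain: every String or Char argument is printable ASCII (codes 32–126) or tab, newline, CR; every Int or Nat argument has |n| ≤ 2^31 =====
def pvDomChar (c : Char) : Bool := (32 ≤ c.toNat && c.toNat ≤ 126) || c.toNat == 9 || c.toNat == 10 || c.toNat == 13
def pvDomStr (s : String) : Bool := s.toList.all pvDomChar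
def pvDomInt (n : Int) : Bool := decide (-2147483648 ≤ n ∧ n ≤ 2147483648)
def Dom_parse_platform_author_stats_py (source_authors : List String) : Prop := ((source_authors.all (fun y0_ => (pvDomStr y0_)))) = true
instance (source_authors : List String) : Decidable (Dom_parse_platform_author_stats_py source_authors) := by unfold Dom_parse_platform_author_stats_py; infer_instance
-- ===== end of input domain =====

-- B replaces A's interleaved dict-of-sets/counter updates by a first-occurrence-wins
-- key→tier dict followed by a per-platform aggregation pass (objective: alternative).

-- ===== PORT A =====
-- shared parse of one entry (identical guard code in both Pythons):
-- colon_pos = e.rfind(":"); if -1 skip; key = e[:colon_pos]; tier = e[colon_pos+1:];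
-- if key.find(":") == -1 skip.
def pvParse (e : String) : Option (String × String) :=
  let cp := PySem.Str.rfind e ":"
  if cp == -1 then none
  else
    let key := PySem.Str.slice e none (some cp)
    let tier := PySem.Str.slice e (some (cp + 1)) none
    if PySem.Str.find key ":" == -1 then none
    else some (key, tier)

-- platform = key[:key.find(":")] (only evaluated after the find ≠ -1 guard)
def pvPlatOf (key : String) : String :=
  PySem.Str.slice key none (some (PySem.Str.find key ":"))

-- tier_str.isdigit() and int(tier_str) == 1; when isdigit is true int() succeeds,
-- so the getD 0 default is never the decider (exact on the guard).
def pvTier1 (t : String) : Bool :=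
  PySem.Str.strIsdigit t && ((PySem.Int.ofStr? t).getD 0 == 1)

-- A's loop body over (platform_keys, platform_t1)
def pvStepA (st : PySem.Dict String (PySem.Set String) × PySem.Dict String Int)
    (e : String) : PySem.Dict String (PySem.Set String) × PySem.Dict String Int :=
  match pvParse e with
  | none => st
  | some (key, tier) =>
    let platform := pvPlatOf key
    let pk := if st.1.contains platform then st.1 else st.1.insert platform PySem.Set.empty
    let pt := if st.1.contains platform then st.2 else st.2.insert platform 0
    let s := pk.getD platform PySem.Set.empty
    let isNew := !(PySem.Set.contains s key)
    let pk' := pk.insert platform (PySem.Set.add s key)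
    let pt' := if isNew && pvTier1 tier then pt.modify platform 0 (· + 1) else pt
    (pk', pt')

def parse_platform_author_stats_py (source_authors : List String) : List (String × Int × Int) :=
  let st := source_authors.foldl pvStepA (PySem.Dict.empty, PySem.Dict.empty)
  -- platform_t1[platform] is always present (the two dicts share keys); getD 0 is exact here
  st.1.items.map (fun pk => (pk.1, ((PySem.Set.len pk.2 : Int), st.2.getD pk.1 0)))

-- ===== PORT B =====
-- pass 1: first-occurrence-wins dict key → tier
def pvStepB1 (d : PySem.Dict String String) (e : String) : PySem.Dict String String :=
  match pvParse e with
  | none => d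
  | some (key, tier) => if d.contains key then d else d.insert key tier

-- pass 2: aggregate (count, tier-1 count) per platform
def pvStepB2 (s : PySem.Dict String (Int × Int)) (kv : String × String) :
    PySem.Dict String (Int × Int) :=
  s.insert (pvPlatOf kv.1)
    ((s.getD (pvPlatOf kv.1) (0, 0)).1 + 1,
     (s.getD (pvPlatOf kv.1) (0, 0)).2 + (if pvTier1 kv.2 then 1 else 0))

def parse_platform_author_stats_py_alt (source_authors : List String) : List (String × Int × Int) :=
  ((source_authors.foldl pvStepB1 PySem.Dict.empty).items.foldl pvStepB2 PySem.Dict.empty).items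

-- ===== PRECONDITION & SPEC =====
def Spec_parse_platform_author_stats_py (source_authors : List String) (out : List (String × Int × Int)) : Prop := out = parse_platform_author_stats_py_alt source_authors
instance (source_authors : List String) (out : List (String × Int × Int)) : Decidable (Spec_parse_platform_author_stats_py source_authors out) := by unfold Spec_parse_platform_author_stats_py; infer_instance

-- ===== CLAIM (what is proved, stated in full; the proofs are below) =====
def Claim_equal_parse_platform_author_stats_py : Prop := ∀ (source_authors : List String), Dom_parse_platform_author_stats_py source_authors → Spec_parse_platform_author_stats_py source_authors (parse_platform_author_stats_py source_authors)


-- ===== LEMMAS AND PROOFS =====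

-- the two loop bodies specialised to an already-parsed (key, tier) pair
def pvStepP (st : PySem.Dict String (PySem.Set String) × PySem.Dict String Int)
    (x : String × String) : PySem.Dict String (PySem.Set String) × PySem.Dict String Int :=
  let platform := pvPlatOf x.1
  let pk := if st.1.contains platform then st.1 else st.1.insert platform PySem.Set.empty
  let pt := if st.1.contains platform then st.2 else st.2.insert platform 0
  let s := pk.getD platform PySem.Set.empty
  let isNew := !(PySem.Set.contains s x.1)
  (pk.insert platform (PySem.Set.add s x.1),
   if isNew && pvTier1 x.2 then pt.modify platform 0 (· + 1) else pt)

def pvStepB1P (d : PySem.Dict String String) (x : String × String) : PySem.Dict String String :=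
  if d.contains x.1 then d else d.insert x.1 x.2

theorem pvStepA_eq (st : PySem.Dict String (PySem.Set String) × PySem.Dict String Int)
    (e : String) :
    pvStepA st e = match pvParse e with | none => st | some x => pvStepP st x := by
  cases h : pvParse e with
  | none => simp [pvStepA, h]
  | some x => obtain ⟨k, t⟩ := x; simp [pvStepA, pvStepP, h]

theorem pvStepB1_eq (d : PySem.Dict String String) (e : String) :
    pvStepB1 d e = match pvParse e with | none => d | some x => pvStepB1P d x := by
  cases h : pvParse e with
  | none => simp [pvStepB1, h]
  | some x => obtain ⟨k, t⟩ := x; simp [pvStepB1, pvStepB1P, h]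

theorem pvFoldA (l : List String) (st : PySem.Dict String (PySem.Set String) × PySem.Dict String Int) :
    l.foldl pvStepA st = (l.filterMap pvParse).foldl pvStepP st := by
  rw [List.foldl_filterMap]
  induction l generalizing st with
  | nil => rfl
  | cons e l ih => simp only [List.foldl_cons, pvStepA_eq]; cases pvParse e <;> exact ih _

theorem pvFoldB1 (l : List String) (d : PySem.Dict String String) :
    l.foldl pvStepB1 d = (l.filterMap pvParse).foldl pvStepB1P d := by
  rw [List.foldl_filterMap]
  induction l generalizing d with
  | nil => rfl
  | cons e l ih => simp only [List.foldl_cons, pvStepB1_eq]; cases pvParse e <;> exact ih _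

-- the invariant tying A's loop state to B's first-pass dict
def pvInv (d : PySem.Dict String String)
    (pk : PySem.Dict String (PySem.Set String)) (pt : PySem.Dict String Int) : Prop :=
  pk.keys = PySem.List.dedup (d.keys.map pvPlatOf) ∧
  d.keys.Nodup ∧
  (∀ p, pk.getD p PySem.Set.empty = d.keys.filter (fun k => pvPlatOf k == p)) ∧
  (∀ p, pt.getD p 0 =
    ((d.items.filter (fun kv => pvPlatOf kv.1 == p && pvTier1 kv.2)).length : Int))

theorem pvInv_empty : pvInv PySem.Dict.empty PySem.Dict.empty PySem.Dict.empty := by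
  refine ⟨rfl, ?_, fun p => ?_, fun p => ?_⟩ <;>
    simp [PySem.Dict.keys_empty, PySem.Dict.getD_empty]

theorem pvKeys_insert {ν : Type} (d : PySem.Dict String ν) (k : String) (v : ν) :
    (d.insert k v).keys = PySem.Set.add d.keys k := by
  by_cases h : d.contains k
  · have hmem : k ∈ d.keys := by
      rw [PySem.Dict.contains_eq_decide_mem_keys] at h; simpa using h
    have hL : (d.insert k v).keys = d.keys := by
      have hit := PySem.Dict.items_insert_of_contains d v h
      simp only [PySem.Dict.keys, hit, List.map_map]
      apply List.map_congr_left
      intro a _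
      by_cases hak : (a.1 == k) = true
      · simp only [Function.comp_apply, hak, if_true]
        exact (eq_of_beq hak).symm
      · simp only [Function.comp_apply]
        rw [if_neg (by simpa using hak)]
    rw [hL, PySem.Set.add_of_mem hmem]
  · have hf : d.contains k = false := by simpa using h
    have hit := PySem.Dict.items_insert_of_not_contains d v hf
    have hnm : k ∉ d.keys := by
      rw [PySem.Dict.contains_eq_decide_mem_keys] at hf; simpa using hf
    rw [PySem.Set.add_of_not_mem hnm]
    simp only [PySem.Dict.keys, hit, List.map_append]
    rfl

theorem pvOfList_append_singleton {α : Type} [BEq α] (l : List α) (a : α) :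
    PySem.Set.ofList (l ++ [a]) = PySem.Set.add (PySem.Set.ofList l) a := by
  rw [PySem.Set.ofList_eq_foldl, PySem.Set.ofList_eq_foldl, List.foldl_append]
  rfl

theorem pvInv_step (d : PySem.Dict String String)
    (pk : PySem.Dict String (PySem.Set String)) (pt : PySem.Dict String Int)
    (x : String × String) (h : pvInv d pk pt) :
    pvInv (pvStepB1P d x) (pvStepP (pk, pt) x).1 (pvStepP (pk, pt) x).2 := by
  obtain ⟨h1, h2, h3, h4⟩ := h
  have hmemkeys : ∀ q, pk.contains q = true ↔ q ∈ d.keys.map pvPlatOf := by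
    intro q
    rw [PySem.Dict.contains_eq_decide_mem_keys, h1, PySem.List.dedup_eq_ofList]
    simp [PySem.Set.mem_ofList]
  have hdcont : ∀ k, d.contains k = true ↔ k ∈ d.keys := by
    intro k; rw [PySem.Dict.contains_eq_decide_mem_keys]; simp
  by_cases hk : d.contains x.1
  · -- repeated key: both states unchanged (up to a no-op insert)
    have hkey : x.1 ∈ d.keys := (hdcont _).1 hk
    have hp : pk.contains (pvPlatOf x.1) = true :=
      (hmemkeys _).2 (List.mem_map.2 ⟨x.1, hkey, rfl⟩)
    have hs := h3 (pvPlatOf x.1)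
    have hkmem : x.1 ∈ pk.getD (pvPlatOf x.1) PySem.Set.empty := by
      rw [hs]; exact List.mem_filter.2 ⟨hkey, by simp⟩
    have hcont : PySem.Set.contains (pk.getD (pvPlatOf x.1) PySem.Set.empty) x.1 = true :=
      (PySem.Set.contains_iff _ _).2 hkmem
    have hadd : PySem.Set.add (pk.getD (pvPlatOf x.1) PySem.Set.empty) x.1
        = pk.getD (pvPlatOf x.1) PySem.Set.empty := PySem.Set.add_of_mem hkmem
    simp only [pvStepP, pvStepB1P, hk, hp, if_true, hcont, Bool.not_true, Bool.false_and,
      hadd]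
    refine ⟨?_, h2, ?_, h4⟩
    · rw [pvKeys_insert, h1]
      have hmem : pvPlatOf x.1 ∈ PySem.List.dedup (d.keys.map pvPlatOf) := by
        rw [PySem.List.dedup_eq_ofList]
        exact (PySem.Set.mem_ofList _ _).2 (List.mem_map.2 ⟨x.1, hkey, rfl⟩)
      rw [PySem.Set.add_of_mem hmem]
    · intro q
      rw [PySem.Dict.getD_insert]
      by_cases hq : q = pvPlatOf x.1
      · subst hq; rw [if_pos rfl]; exact hs
      · rw [if_neg hq]; exact h3 q
  · -- new key
    have hknot : x.1 ∉ d.keys := fun hm => by simp [(hdcont x.1).2 hm] at hk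
    have hkf : d.contains x.1 = false := by simpa using hk
    have hitems' : (d.insert x.1 x.2).items = d.items ++ [(x.1, x.2)] :=
      PySem.Dict.items_insert_of_not_contains d x.2 hkf
    have hkeys' : (d.insert x.1 x.2).keys = d.keys ++ [x.1] := by
      simp only [PySem.Dict.keys, hitems', List.map_append]; rfl
    have hnd' : (d.insert x.1 x.2).keys.Nodup := by
      rw [hkeys']
      exact h2.append (List.nodup_singleton _) (List.disjoint_singleton.2 hknot)
    have hfilterItems : ∀ q, q ∉ d.keys.map pvPlatOf → ∀ kv ∈ d.items, (pvPlatOf kv.1 == q) = false := by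
      intro q hq kv hkv
      have : kv.1 ∈ d.keys := List.mem_map.2 ⟨kv, hkv, rfl⟩
      have : pvPlatOf kv.1 ∈ d.keys.map pvPlatOf := List.mem_map.2 ⟨kv.1, this, rfl⟩
      simp only [beq_eq_false_iff_ne, ne_eq]
      intro hcontra; exact hq (hcontra ▸ this)
    by_cases hp : pk.contains (pvPlatOf x.1)
    · -- platform already known
      have hs := h3 (pvPlatOf x.1)
      have hknots : x.1 ∉ pk.getD (pvPlatOf x.1) PySem.Set.empty := by
        rw [hs]; intro hmem; exact hknot (List.mem_filter.1 hmem).1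
      have hcont : PySem.Set.contains (pk.getD (pvPlatOf x.1) PySem.Set.empty) x.1 = false := by
        rw [← Bool.not_eq_true, PySem.Set.contains_iff]; exact hknots
      have hadd : PySem.Set.add (pk.getD (pvPlatOf x.1) PySem.Set.empty) x.1
          = pk.getD (pvPlatOf x.1) PySem.Set.empty ++ [x.1] := PySem.Set.add_of_not_mem hknots
      have hpm : pvPlatOf x.1 ∈ d.keys.map pvPlatOf := (hmemkeys _).1 hp
      simp only [pvStepP, pvStepB1P, hkf, hp, Bool.false_eq_true, if_true, if_false, hcont,
        Bool.not_false, Bool.true_and, hadd]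
      refine ⟨?_, hnd', ?_, ?_⟩
      · rw [pvKeys_insert, h1, hkeys', List.map_append, List.map_singleton,
          PySem.List.dedup_eq_ofList, PySem.List.dedup_eq_ofList, pvOfList_append_singleton,
          PySem.Set.add_of_mem ((PySem.Set.mem_ofList _ _).2 hpm)]
      · intro q
        rw [PySem.Dict.getD_insert, hkeys', List.filter_append]
        by_cases hq : q = pvPlatOf x.1
        · rw [if_pos hq, hq, hs]
          simp
        · have hb : (pvPlatOf x.1 == q) = false := by
            simp only [beq_eq_false_iff_ne, ne_eq]; exact fun hcontra => hq hcontra.symm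
          rw [if_neg hq, h3 q]
          simp [hb]
      · intro q
        rw [hitems', List.filter_append]
        by_cases ht : pvTier1 x.2 = true
        · simp only [ht, if_true]
          rw [PySem.Dict.getD_modify]
          by_cases hq : q = pvPlatOf x.1
          · rw [if_pos hq, hq, h4 (pvPlatOf x.1)]
            simp [ht]
          · have hb : (pvPlatOf x.1 == q) = false := by
              simp only [beq_eq_false_iff_ne, ne_eq]; exact fun hcontra => hq hcontra.symm
            rw [if_neg hq, h4 q]
            simp [hb]
        · have hb : (pvPlatOf x.1 == q && pvTier1 x.2) = false := by simp [ht]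
          simp only [ht, Bool.false_eq_true, if_false]
          rw [h4 q]
          simp [hb]
    · -- brand-new platform
      have hpf : pk.contains (pvPlatOf x.1) = false := by simpa using hp
      have hnomem : pvPlatOf x.1 ∉ d.keys.map pvPlatOf := fun hm => hp ((hmemkeys _).2 hm)
      have hfil : d.keys.filter (fun k => pvPlatOf k == pvPlatOf x.1) = [] := by
        rw [← h3 (pvPlatOf x.1), PySem.Dict.getD_of_not_contains (h := hpf)]; rfl
      have hptD : pt.getD (pvPlatOf x.1) 0 = 0 := by
        rw [h4 (pvPlatOf x.1)]
        have : d.items.filter (fun kv => pvPlatOf kv.1 == pvPlatOf x.1 && pvTier1 kv.2) = [] := by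
          apply List.filter_eq_nil_iff.2
          intro kv hkv
          simp [hfilterItems _ hnomem kv hkv]
        simp [this]
      have hgete : (pk.insert (pvPlatOf x.1) PySem.Set.empty).getD (pvPlatOf x.1) PySem.Set.empty
          = PySem.Set.empty := by
        rw [PySem.Dict.getD_insert]; simp
      have hce : PySem.Set.contains PySem.Set.empty x.1 = false := rfl
      simp only [pvStepP, pvStepB1P, hkf, hp, Bool.false_eq_true, if_false, hgete, hce,
        Bool.not_false, Bool.true_and]
      refine ⟨?_, hnd', ?_, ?_⟩
      · rw [PySem.Dict.insert_insert_self, pvKeys_insert, h1, hkeys', List.map_append,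
          List.map_singleton, PySem.List.dedup_eq_ofList, PySem.List.dedup_eq_ofList,
          pvOfList_append_singleton,
          PySem.Set.add_of_not_mem (show pvPlatOf x.1 ∉ PySem.Set.ofList (d.keys.map pvPlatOf) by
            rw [PySem.Set.mem_ofList]; exact hnomem)]
      · intro q
        rw [PySem.Dict.insert_insert_self, PySem.Dict.getD_insert, hkeys', List.filter_append]
        by_cases hq : q = pvPlatOf x.1
        · rw [if_pos hq, hq, hfil]
          simp
        · have hb : (pvPlatOf x.1 == q) = false := by
            simp only [beq_eq_false_iff_ne, ne_eq]; exact fun hcontra => hq hcontra.symm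
          rw [if_neg hq, h3 q]
          simp [hb]
      · intro q
        rw [hitems', List.filter_append]
        have hfilq : d.items.filter (fun kv => pvPlatOf kv.1 == pvPlatOf x.1 && pvTier1 kv.2) = [] := by
          apply List.filter_eq_nil_iff.2
          intro kv hkv; simp [hfilterItems _ hnomem kv hkv]
        by_cases ht : pvTier1 x.2 = true
        · simp only [ht, if_true]
          rw [PySem.Dict.getD_modify]
          by_cases hq : q = pvPlatOf x.1
          · rw [if_pos hq, hq, PySem.Dict.getD_insert, if_pos rfl, hfilq]
            simp [ht]
          · rw [if_neg hq, PySem.Dict.getD_insert, if_neg hq, h4 q]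
            have hb : (pvPlatOf x.1 == q) = false := by
              simp only [beq_eq_false_iff_ne, ne_eq]; exact fun hcontra => hq hcontra.symm
            simp [hb]
        · have hb : (pvPlatOf x.1 == q && pvTier1 x.2) = false := by simp [ht]
          simp only [ht, Bool.false_eq_true, if_false]
          rw [PySem.Dict.getD_insert]
          by_cases hq : q = pvPlatOf x.1
          · have ht' : pvTier1 x.2 = false := by simpa using ht
            rw [if_pos hq, hq, hfilq]
            simp [ht']
          · rw [if_neg hq, h4 q]
            simp [hb]

theorem pvInv_foldl (L : List (String × String)) (d : PySem.Dict String String)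
    (pk : PySem.Dict String (PySem.Set String)) (pt : PySem.Dict String Int)
    (h : pvInv d pk pt) :
    pvInv (L.foldl pvStepB1P d) (L.foldl pvStepP (pk, pt)).1 (L.foldl pvStepP (pk, pt)).2 := by
  induction L generalizing d pk pt with
  | nil => exact h
  | cons x L ih =>
    simp only [List.foldl_cons]
    have := pvInv_step d pk pt x h
    have hpair : pvStepP (pk, pt) x = ((pvStepP (pk, pt) x).1, (pvStepP (pk, pt) x).2) := rfl
    rw [hpair]
    exact ih _ _ _ this

theorem pvB2_getD (l : List (String × String)) (s : PySem.Dict String (Int × Int)) (p : String) :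
    (l.foldl pvStepB2 s).getD p (0, 0) =
      ((s.getD p (0, 0)).1 + ((l.filter (fun kv => pvPlatOf kv.1 == p)).length : Int),
       (s.getD p (0, 0)).2 + ((l.filter (fun kv => pvPlatOf kv.1 == p && pvTier1 kv.2)).length : Int)) := by
  induction l generalizing s with
  | nil => simp
  | cons x l ih =>
    simp only [List.foldl_cons, ih, pvStepB2, PySem.Dict.getD_insert]
    by_cases hp : pvPlatOf x.1 = p
    · simp [hp, List.filter_cons]
      by_cases ht : pvTier1 x.2 = true <;> simp [ht] <;> omega
    · have hb : (pvPlatOf x.1 == p) = false := by simp [hp]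
      have hp' : ¬ p = pvPlatOf x.1 := fun h' => hp h'.symm
      simp [hp', hb]

theorem pvOut_eq (d : PySem.Dict String String)
    (pk : PySem.Dict String (PySem.Set String)) (pt : PySem.Dict String Int)
    (h : pvInv d pk pt) :
    pk.items.map (fun q => (q.1, ((PySem.Set.len q.2 : Int), pt.getD q.1 0))) =
      (d.items.foldl pvStepB2 PySem.Dict.empty).items := by
  obtain ⟨h1, h2, h3, h4⟩ := h
  have hndpk : pk.keys.Nodup := by
    rw [h1, PySem.List.dedup_eq_ofList]; exact PySem.Set.nodup_ofList _
  have hmapkeys : d.items.map (fun kv => pvPlatOf kv.1) = d.keys.map pvPlatOf := by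
    simp only [PySem.Dict.keys, List.map_map]; rfl
  have hfold : d.items.foldl pvStepB2 PySem.Dict.empty
      = d.items.foldl (fun s kv => s.insert (pvPlatOf kv.1)
          ((s.getD (pvPlatOf kv.1) (0,0)).1 + 1,
           (s.getD (pvPlatOf kv.1) (0,0)).2 + (if pvTier1 kv.2 then 1 else 0))) PySem.Dict.empty := rfl
  have hkeys2 : (d.items.foldl pvStepB2 PySem.Dict.empty).keys = PySem.Set.ofList (d.keys.map pvPlatOf) := by
    rw [hfold, PySem.Dict.keys_foldl_insert_key, PySem.Dict.keys_empty, PySem.Set.update_nil_left, hmapkeys]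
  have hnd2 : (d.items.foldl pvStepB2 PySem.Dict.empty).keys.Nodup := by
    rw [hkeys2]; exact PySem.Set.nodup_ofList _
  rw [PySem.Dict.items_eq_map_keys pk hndpk PySem.Set.empty,
      PySem.Dict.items_eq_map_keys _ hnd2 (0,0), List.map_map, hkeys2, h1, PySem.List.dedup_eq_ofList]
  apply List.map_congr_left
  intro p hp
  have hcnt : (List.filter (fun k => pvPlatOf k == p) d.keys).length
      = (List.filter (fun kv => pvPlatOf kv.1 == p) d.items).length := by
    simp only [PySem.Dict.keys, List.filter_map, List.length_map]; rfl
  simp only [Function.comp_apply, pvB2_getD, PySem.Dict.getD_empty, h3, h4, PySem.Set.len,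
    Prod.mk.injEq, zero_add]
  exact ⟨trivial, by rw [hcnt], trivial⟩

-- ===== VERDICT (by name: the statement is the Claim_ definition above) =====
theorem parse_platform_author_stats_py_spec : Claim_equal_parse_platform_author_stats_py := by
  intro sa _
  unfold Spec_parse_platform_author_stats_py
  unfold parse_platform_author_stats_py parse_platform_author_stats_py_alt
  rw [pvFoldA, pvFoldB1]
  dsimp only
  have h := pvInv_foldl (sa.filterMap pvParse) PySem.Dict.empty PySem.Dict.empty PySem.Dict.empty pvInv_empty
  exact pvOut_eq _ _ _ h
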